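-- pv_equiv track=rewrite | github.com/jeremychang9/Dynamic-Plug-and-Play-Rational-Speech-Act-Framework | evaluation.py | get_system_emotional_state
-- ===== SOURCE A (Python) =====
-- def get_system_emotional_state(sys_eds, speaker_roles, user_emotional_state):
--     sys_emotional_state = 'neutral'
--
--     # when user is in inter-personal state, system is in hybrid state, system should be self-contagion
--     if user_emotional_state == 'inter-personal' :
--         for i, sys_ed in enumerate(sys_eds):
--             if sys_ed == None: # skip sys_ed
--                 continue
--             for j ,(ed, role) in reversed(list(enumerate(zip(sys_ed, speaker_roles[0])))):
--                 if role == 'sys' and ed == 1: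
--                     sys_emotional_state = 'self-contagion' # system should be in the self-contagion state
--                     return sys_emotional_state
--                 elif role == 'usr' and ed == 1:
--                     sys_emotional_state = 'inter-personal' # system should be in the inter-personal state
--                     # return sys_emotional_state
--
--     # when user is in self-contagion state, system is in hybrid state, system should be inter-personal
--     elif user_emotional_state == 'neutral' or 'self-contagion':
--         for i, sys_ed in enumerate(sys_eds):
--             if sys_ed == None: # skip sys_ed
--                 continue
--             for j ,(ed, role) in reversed(list(enumerate(zip(sys_ed, speaker_roles[0])))):
--                 if role == 'sys' and ed == 1:
--                     sys_emotional_state = 'self-contagion' # system should be in the inter-personal state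
--                     # return sys_emotional_state
--                 elif role == 'usr' and ed == 1:
--                     sys_emotional_state = 'inter-personal' # system should be in the self-contagion state
--                     return sys_emotional_state
--
--     return sys_emotional_state
-- ===== SOURCE B (Python) =====
-- def get_system_emotional_state(sys_eds, speaker_roles, user_emotional_state):
--     # One pass computing two existence flags, then a table-style decision.
--     has_sys = has_usr = False
--     for sys_ed in sys_eds:
--         if sys_ed is None:
--             continue
--         for ed, role in zip(sys_ed, speaker_roles[0]):
--             if ed == 1:
--                 has_sys = has_sys or role == 'sys'
--                 has_usr = has_usr or role == 'usr'
--     if user_emotional_state == 'inter-personal':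
--         return 'self-contagion' if has_sys else 'inter-personal' if has_usr else 'neutral'
--     return 'inter-personal' if has_usr else 'self-contagion' if has_sys else 'neutral'
-- ===== Notes on version B (the rewrite author's own statement) =====
-- stated objective: simpler
-- what changed: Replaced A's two duplicated early-return loop blocks (with a reversed enumerate inner loop and mutable state) by one pass that computes two existence flags (any sys-row emotion, any usr-row emotion) and then a small conditional table per branch of user_emotional_state.
import Mathlib
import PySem

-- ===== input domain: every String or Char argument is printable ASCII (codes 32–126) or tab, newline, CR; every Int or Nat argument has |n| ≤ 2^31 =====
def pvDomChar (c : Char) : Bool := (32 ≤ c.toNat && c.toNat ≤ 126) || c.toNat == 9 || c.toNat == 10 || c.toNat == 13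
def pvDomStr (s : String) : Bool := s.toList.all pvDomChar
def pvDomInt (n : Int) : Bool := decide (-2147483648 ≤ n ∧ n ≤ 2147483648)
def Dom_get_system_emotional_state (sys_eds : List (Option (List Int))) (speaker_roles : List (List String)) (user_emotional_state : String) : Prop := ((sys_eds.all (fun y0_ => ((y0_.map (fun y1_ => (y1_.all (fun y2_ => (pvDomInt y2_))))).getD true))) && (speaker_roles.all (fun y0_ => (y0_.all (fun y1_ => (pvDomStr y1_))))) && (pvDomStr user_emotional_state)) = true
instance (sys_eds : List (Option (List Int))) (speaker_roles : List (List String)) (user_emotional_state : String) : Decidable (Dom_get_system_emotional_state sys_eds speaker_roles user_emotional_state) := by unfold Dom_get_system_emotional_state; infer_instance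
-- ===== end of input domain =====

-- B replaces A's two duplicated early-return loops by one flag-collecting pass and a
-- decision table; same return value everywhere A returns (objective: simpler).

-- ===== PORT A =====
-- inner loop of the 'inter-personal' branch: on 'sys' match return early ("self-contagion"),
-- on 'usr' match update the state and keep going. .error = Python's `return`.
def pvInnerA1 : List (Int × String) → String → Except String String
  | [], st => .ok st
  | (ed, role) :: rest, st =>
    if role == "sys" && ed == 1 then .error "self-contagion"
    else if role == "usr" && ed == 1 then pvInnerA1 rest "inter-personal"
    else pvInnerA1 rest st

def pvOuterA1 : List (Option (List Int)) → List String → String → String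
  | [], _, st => st
  | none :: rest, roles, st => pvOuterA1 rest roles st
  | some row :: rest, roles, st =>
    match pvInnerA1 ((row.zip roles).reverse) st with
    | .error r => r
    | .ok st' => pvOuterA1 rest roles st'

-- inner loop of the (always-true) elif branch: 'sys' updates the state, 'usr' returns early.
def pvInnerA2 : List (Int × String) → String → Except String String
  | [], st => .ok st
  | (ed, role) :: rest, st =>
    if role == "sys" && ed == 1 then pvInnerA2 rest "self-contagion"
    else if role == "usr" && ed == 1 then .error "inter-personal"
    else pvInnerA2 rest st

def pvOuterA2 : List (Option (List Int)) → List String → String → String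
  | [], _, st => st
  | none :: rest, roles, st => pvOuterA2 rest roles st
  | some row :: rest, roles, st =>
    match pvInnerA2 ((row.zip roles).reverse) st with
    | .error r => r
    | .ok st' => pvOuterA2 rest roles st'

-- speaker_roles[0] is only reached when some row is non-None; Pre_ excludes the
-- IndexError inputs, so headD [] is exact on Pre_.
def get_system_emotional_state (sys_eds : List (Option (List Int))) (speaker_roles : List (List String)) (user_emotional_state : String) : String :=
  let roles := speaker_roles.headD []
  if user_emotional_state == "inter-personal" then pvOuterA1 sys_eds roles "neutral"
  else pvOuterA2 sys_eds roles "neutral"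

-- ===== PORT B =====
def pvStep (q : Bool × Bool) (pr : Int × String) : Bool × Bool :=
  if pr.1 == 1 then (q.1 || pr.2 == "sys", q.2 || pr.2 == "usr") else q

def pvRowStep (roles : List String) (p : Bool × Bool) (row : Option (List Int)) : Bool × Bool :=
  match row with
  | none => p
  | some r => (r.zip roles).foldl pvStep p

def pvFlags (sys_eds : List (Option (List Int))) (roles : List String) : Bool × Bool :=
  sys_eds.foldl (pvRowStep roles) (false, false)

def get_system_emotional_state_alt (sys_eds : List (Option (List Int))) (speaker_roles : List (List String)) (user_emotional_state : String) : String :=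
  let f := pvFlags sys_eds (speaker_roles.headD [])
  if user_emotional_state == "inter-personal" then
    if f.1 then "self-contagion" else if f.2 then "inter-personal" else "neutral"
  else
    if f.2 then "inter-personal" else if f.1 then "self-contagion" else "neutral"

-- ===== PRECONDITION & SPEC =====
-- Pre_ excludes exactly the inputs where Python A raises IndexError on speaker_roles[0]:
-- speaker_roles empty while some sys_ed row is non-None (B raises there too).
def Pre_get_system_emotional_state (sys_eds : List (Option (List Int))) (speaker_roles : List (List String)) (user_emotional_state : String) : Prop :=
  speaker_roles ≠ [] ∨ sys_eds.all Option.isNone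
instance (sys_eds : List (Option (List Int))) (speaker_roles : List (List String)) (user_emotional_state : String) : Decidable (Pre_get_system_emotional_state sys_eds speaker_roles user_emotional_state) := by unfold Pre_get_system_emotional_state; infer_instance

def pvWitness_get_system_emotional_state : List (Option (List Int)) × List (List String) × String :=
  ([some [1, 0], none], [["usr", "sys"]], "inter-personal")

def Spec_get_system_emotional_state (sys_eds : List (Option (List Int))) (speaker_roles : List (List String)) (user_emotional_state : String) (out : String) : Prop := out = get_system_emotional_state_alt sys_eds speaker_roles user_emotional_state
instance (sys_eds : List (Option (List Int))) (speaker_roles : List (List String)) (user_emotional_state : String) (out : String) : Decidable (Spec_get_system_emotional_state sys_eds speaker_roles user_emotional_state out) := by unfold Spec_get_system_emotional_state; infer_instance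

-- ===== CLAIM (what is proved, stated in full; the proofs are below) =====
def Claim_equal_get_system_emotional_state : Prop := ∀ (sys_eds : List (Option (List Int))) (speaker_roles : List (List String)) (user_emotional_state : String), Dom_get_system_emotional_state sys_eds speaker_roles user_emotional_state → Pre_get_system_emotional_state sys_eds speaker_roles user_emotional_state → Spec_get_system_emotional_state sys_eds speaker_roles user_emotional_state (get_system_emotional_state sys_eds speaker_roles user_emotional_state)

-- ===== LEMMAS AND PROOFS =====
def pvHasSys (pairs : List (Int × String)) : Bool := pairs.any (fun p => p.2 == "sys" && p.1 == 1)
def pvHasUsr (pairs : List (Int × String)) : Bool := pairs.any (fun p => p.2 == "usr" && p.1 == 1)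
def pvRowsSys (rows : List (Option (List Int))) (roles : List String) : Bool :=
  rows.any (fun r => match r with | none => false | some l => pvHasSys (l.zip roles))
def pvRowsUsr (rows : List (Option (List Int))) (roles : List String) : Bool :=
  rows.any (fun r => match r with | none => false | some l => pvHasUsr (l.zip roles))

theorem pvInnerA1_eq (pairs : List (Int × String)) (st : String) :
    pvInnerA1 pairs st = if pvHasSys pairs then .error "self-contagion"
      else .ok (if pvHasUsr pairs then "inter-personal" else st) := by
  induction pairs generalizing st with
  | nil => simp [pvInnerA1, pvHasSys, pvHasUsr]
  | cons p rest ih =>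
    obtain ⟨ed, role⟩ := p
    simp only [pvInnerA1, pvHasSys, pvHasUsr, List.any_cons] at *
    by_cases h1 : (role == "sys" && ed == 1) = true <;>
      by_cases h2 : (role == "usr" && ed == 1) = true <;>
      simp [h1, h2, ih]

theorem pvInnerA2_eq (pairs : List (Int × String)) (st : String) :
    pvInnerA2 pairs st = if pvHasUsr pairs then .error "inter-personal"
      else .ok (if pvHasSys pairs then "self-contagion" else st) := by
  induction pairs generalizing st with
  | nil => simp [pvInnerA2, pvHasSys, pvHasUsr]
  | cons p rest ih =>
    obtain ⟨ed, role⟩ := p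
    simp only [pvInnerA2, pvHasSys, pvHasUsr, List.any_cons] at *
    by_cases h1 : (role == "sys" && ed == 1) = true <;>
      by_cases h2 : (role == "usr" && ed == 1) = true
    · simp only [Bool.and_eq_true, beq_iff_eq] at h1 h2
      simp [h1.1] at h2
    all_goals simp [h1, h2, ih]

theorem pvHasSys_reverse (pairs : List (Int × String)) : pvHasSys pairs.reverse = pvHasSys pairs := by
  simp [pvHasSys]
theorem pvHasUsr_reverse (pairs : List (Int × String)) : pvHasUsr pairs.reverse = pvHasUsr pairs := by
  simp [pvHasUsr]

theorem pvOuterA1_eq (rows : List (Option (List Int))) (roles : List String) (st : String) :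
    pvOuterA1 rows roles st = if pvRowsSys rows roles then "self-contagion"
      else if pvRowsUsr rows roles then "inter-personal" else st := by
  induction rows generalizing st with
  | nil => simp [pvOuterA1, pvRowsSys, pvRowsUsr]
  | cons r rest ih =>
    cases r with
    | none => simp [pvOuterA1, pvRowsSys, pvRowsUsr, ih]
    | some l =>
      simp only [pvOuterA1, pvInnerA1_eq, pvHasSys_reverse, pvHasUsr_reverse,
        pvRowsSys, pvRowsUsr, List.any_cons]
      by_cases h1 : pvHasSys (l.zip roles) = true <;>
        by_cases h2 : pvHasUsr (l.zip roles) = true <;>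
        simp [h1, h2, ih, pvRowsSys, pvRowsUsr]

theorem pvOuterA2_eq (rows : List (Option (List Int))) (roles : List String) (st : String) :
    pvOuterA2 rows roles st = if pvRowsUsr rows roles then "inter-personal"
      else if pvRowsSys rows roles then "self-contagion" else st := by
  induction rows generalizing st with
  | nil => simp [pvOuterA2, pvRowsSys, pvRowsUsr]
  | cons r rest ih =>
    cases r with
    | none => simp [pvOuterA2, pvRowsSys, pvRowsUsr, ih]
    | some l =>
      simp only [pvOuterA2, pvInnerA2_eq, pvHasSys_reverse, pvHasUsr_reverse,
        pvRowsSys, pvRowsUsr, List.any_cons]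
      by_cases h1 : pvHasSys (l.zip roles) = true <;>
        by_cases h2 : pvHasUsr (l.zip roles) = true <;>
        simp [h1, h2, ih, pvRowsSys, pvRowsUsr]

theorem pvFlagsInner_eq (pairs : List (Int × String)) (q : Bool × Bool) :
    pairs.foldl pvStep q = (q.1 || pvHasSys pairs, q.2 || pvHasUsr pairs) := by
  induction pairs generalizing q with
  | nil => simp [pvHasSys, pvHasUsr]
  | cons p rest ih =>
    obtain ⟨ed, role⟩ := p
    simp only [List.foldl_cons]
    rw [ih]
    by_cases h : (ed == 1) = true <;>
      simp [pvStep, h, pvHasSys, pvHasUsr, Bool.or_assoc, Bool.and_comm]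

theorem pvFlags_eq (rows : List (Option (List Int))) (roles : List String) :
    pvFlags rows roles = (pvRowsSys rows roles, pvRowsUsr rows roles) := by
  have main : ∀ (rows : List (Option (List Int))) (q : Bool × Bool),
      rows.foldl (pvRowStep roles) q
        = (q.1 || pvRowsSys rows roles, q.2 || pvRowsUsr rows roles) := by
    intro rows
    induction rows with
    | nil => intro q; simp [pvRowsSys, pvRowsUsr]
    | cons r rest ih =>
      intro q
      simp only [List.foldl_cons]
      rw [ih]
      cases r with
      | none => simp [pvRowStep, pvRowsSys, pvRowsUsr, List.any_cons]
      | some l =>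
        simp only [pvRowStep, pvFlagsInner_eq]
        simp [pvRowsSys, pvRowsUsr, List.any_cons, Bool.or_assoc]
  simpa [pvFlags] using main rows (false, false)

-- ===== VERDICT (by name: the statement is the Claim_ definition above) =====
theorem get_system_emotional_state_spec : Claim_equal_get_system_emotional_state := by
  intro sys_eds speaker_roles ues _ _
  unfold Spec_get_system_emotional_state get_system_emotional_state get_system_emotional_state_alt
  simp [pvFlags_eq, pvOuterA1_eq, pvOuterA2_eq]
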